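-- pv_equiv track=rewrite | github.com/GregoryKogan/hexqr | Modules/scaner.py | index_by_position
-- ===== SOURCE A (Python) =====
-- def index_by_position(row, position, n):
--     cells_at_current_row = n * 2 + 1
--     current_pos = 1
--     current_row = 1
--     current_index = 1
--     if current_row == row and current_pos == position:
--         return current_index
--     while current_index < n*n*6:
--         current_index += 1
--         current_pos += 1
--         if current_pos > cells_at_current_row:
--             current_pos = 1
--             current_row += 1
--             if current_row <= n:
--                 cells_at_current_row += 2
--             elif current_row != n + 1:
--                 cells_at_current_row -= 2
--         if current_row == row and current_pos == position:
--             return current_index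
--     return None
-- ===== SOURCE B (Python) =====
-- def _row_width(row, n):
--     return 2 * n - 1 + 2 * min(row, 2 * n + 1 - row)
--
--
-- def _row_prefix(row, n):
--     if row <= n:
--         return (row - 1) * (2 * n - 1 + row)
--     return 6 * n * n - (2 * n - row + 1) * (4 * n + 1 - row)
--
--
-- def index_by_position(row, position, n):
--     if n <= 0 or not (1 <= row <= 2 * n):
--         return None
--     if not (1 <= position <= _row_width(row, n)):
--         return None
--     return _row_prefix(row, n) + position
-- ===== Notes on version B (the rewrite author's own statement) =====
-- stated objective: faster
-- what changed: A walks the grid cell by cell (up to 6n^2 loop iterations) until it hits (row, position); B computes the answer in O(1) as a closed-form prefix sum of per-row cell counts (rowPrefix(row) + position) after bounds checks.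
-- intended difference: On degenerate grids n <= 0 with position = 1 and 1 <= row <= max(1, 6n^2), A's collapsed loop state makes it return `row` as an accidental index; B returns None, the intended answer since a grid of size n <= 0 has no cells. — e.g. on index_by_position(2, 1, -1): A returns some 2, B returns none
import Mathlib
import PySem

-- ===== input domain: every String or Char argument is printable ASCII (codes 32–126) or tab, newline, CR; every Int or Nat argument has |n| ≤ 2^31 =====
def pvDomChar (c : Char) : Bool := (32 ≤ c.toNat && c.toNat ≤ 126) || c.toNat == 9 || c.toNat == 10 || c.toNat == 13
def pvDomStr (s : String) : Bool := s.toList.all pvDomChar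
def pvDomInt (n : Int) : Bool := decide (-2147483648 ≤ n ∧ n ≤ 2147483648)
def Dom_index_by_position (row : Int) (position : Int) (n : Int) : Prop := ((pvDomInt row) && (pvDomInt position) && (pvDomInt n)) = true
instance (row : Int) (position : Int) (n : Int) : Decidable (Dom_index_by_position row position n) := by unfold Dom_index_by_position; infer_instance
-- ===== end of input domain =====

-- B replaces A's linear walk over all 6n² cells by an O(1) closed-form prefix sum of
-- the per-row cell counts; on the degenerate grids n ≤ 0 (D_ below) B returns none
-- where A returns an accidental value. Objective: faster (asymptotic).

-- ===== PORT A =====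
-- while-loop of A: state (idx, pos, crow, cells); runs while idx < 6*n*n
def ibpLoop (row position n : Int) (idx pos crow cells : Int) : Option Int :=
  if h : idx < 6 * n * n then
    let idx' := idx + 1
    let pos' := pos + 1
    let s : Int × Int × Int :=
      if pos' > cells then
        (1, crow + 1,
          if crow + 1 ≤ n then cells + 2
          else if crow + 1 ≠ n + 1 then cells - 2 else cells)
      else (pos', crow, cells)
    if s.2.1 = row ∧ s.1 = position then some idx'
    else ibpLoop row position n idx' s.1 s.2.1 s.2.2
  else none
termination_by (6 * n * n - idx).toNat
decreasing_by omega

def index_by_position (row : Int) (position : Int) (n : Int) : Option Int :=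
  if 1 = row ∧ 1 = position then some 1
  else ibpLoop row position n 1 1 1 (n * 2 + 1)

-- ===== PORT B =====
def rowWidth (row n : Int) : Int := 2 * n - 1 + 2 * min row (2 * n + 1 - row)

def rowPrefix (row n : Int) : Int :=
  if row ≤ n then (row - 1) * (2 * n - 1 + row)
  else 6 * n * n - (2 * n - row + 1) * (4 * n + 1 - row)

def index_by_position_alt (row : Int) (position : Int) (n : Int) : Option Int :=
  if n ≤ 0 ∨ ¬ (1 ≤ row ∧ row ≤ 2 * n) then none
  else if ¬ (1 ≤ position ∧ position ≤ rowWidth row n) then none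
  else some (rowPrefix row n + position)

-- ===== PRECONDITION & SPEC =====
-- On degenerate grids n ≤ 0 with position = 1 and 1 ≤ row ≤ max 1 (6n²), A's loop state
-- collapses and A returns `row` as an accidental "index"; B returns none, the intended
-- answer since such a grid has no cells.
def D_index_by_position (row : Int) (position : Int) (n : Int) : Prop :=
  n ≤ 0 ∧ position = 1 ∧ 1 ≤ row ∧ (row = 1 ∨ row ≤ 6 * n * n)
instance (row : Int) (position : Int) (n : Int) : Decidable (D_index_by_position row position n) := by unfold D_index_by_position; infer_instance

def Spec_index_by_position (row : Int) (position : Int) (n : Int) (out : Option Int) : Prop := ¬ D_index_by_position row position n → out = index_by_position_alt row position n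
instance (row : Int) (position : Int) (n : Int) (out : Option Int) : Decidable (Spec_index_by_position row position n out) := by unfold Spec_index_by_position; infer_instance

def pvDiffWitness_index_by_position : Int × Int × Int := (2, 1, -1)
def pvDiffWitnessOut_index_by_position : (Option Int) × (Option Int) := (some 2, none)

-- ===== CLAIM (what is proved, stated in full; the proofs are below) =====
def Claim_unchanged_index_by_position : Prop := ∀ (row : Int) (position : Int) (n : Int), Dom_index_by_position row position n → Spec_index_by_position row position n (index_by_position row position n)
def Claim_changed_index_by_position : Prop := Dom_index_by_position (pvDiffWitness_index_by_position.1) (pvDiffWitness_index_by_position.2.1) (pvDiffWitness_index_by_position.2.2) ∧ D_index_by_position (pvDiffWitness_index_by_position.1) (pvDiffWitness_index_by_position.2.1) (pvDiffWitness_index_by_position.2.2) ∧ index_by_position (pvDiffWitness_index_by_position.1) (pvDiffWitness_index_by_position.2.1) (pvDiffWitness_index_by_position.2.2) = pvDiffWitnessOut_index_by_position.1 ∧ index_by_position_alt (pvDiffWitness_index_by_position.1) (pvDiffWitness_index_by_position.2.1) (pvDiffWitness_index_by_position.2.2) = pvDiffWitnessOut_index_by_position.2 ∧ pvDiffWitnessOut_index_by_position.1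 ≠ pvDiffWitnessOut_index_by_position.2
def Claim_exact_index_by_position : Prop := ∀ (row : Int) (position : Int) (n : Int), Dom_index_by_position row position n → D_index_by_position row position n → index_by_position row position n ≠ index_by_position_alt row position n

-- ===== LEMMAS AND PROOFS =====

theorem rowWidth_pos (n r : Int) (_hn : 1 ≤ n) (h1 : 1 ≤ r) (h2 : r ≤ 2 * n) :
    1 ≤ rowWidth r n := by
  unfold rowWidth; omega

theorem rowPrefix_one (n : Int) (hn : 1 ≤ n) : rowPrefix 1 n = 0 := by
  unfold rowPrefix; rw [if_pos hn]; ring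

theorem rowPrefix_top (n : Int) (hn : 1 ≤ n) : rowPrefix (2 * n + 1) n = 6 * n * n := by
  unfold rowPrefix; rw [if_neg (by omega)]; ring

theorem rowPrefix_step (n r : Int) (hn : 1 ≤ n) (_h1 : 1 ≤ r) (h2 : r ≤ 2 * n) :
    rowPrefix (r + 1) n = rowPrefix r n + rowWidth r n := by
  unfold rowPrefix rowWidth
  rcases lt_trichotomy r n with h | h | h
  · rw [if_pos (by omega), if_pos (by omega), min_eq_left (by omega)]; ring
  · subst h
    rw [if_neg (by omega), if_pos (by omega), min_eq_left (by omega)]; ring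
  · rw [if_neg (by omega), if_neg (by omega), min_eq_right (by omega)]; ring

theorem rowPrefix_mono (n r s : Int) (hn : 1 ≤ n) (h1 : 1 ≤ r) (hrs : r ≤ s)
    (h2 : s ≤ 2 * n + 1) : rowPrefix r n ≤ rowPrefix s n := by
  have key : ∀ (k : Nat) (r : Int), 1 ≤ r → r + (k : Int) ≤ 2 * n + 1 →
      rowPrefix r n ≤ rowPrefix (r + (k : Int)) n := by
    intro k
    induction k with
    | zero => intro r _ _; simp
    | succ m ih =>
      intro r hr hle
      have hcast : r + ((m + 1 : Nat) : Int) = r + (m : Int) + 1 := by push_cast; ring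
      rw [hcast]
      have hcast' : r + ((m : Nat) : Int) + 1 ≤ 2 * n + 1 := by push_cast at hle ⊢; omega
      have hstep := rowPrefix_step n (r + (m : Int)) hn (by omega) (by omega)
      have hw := rowWidth_pos n (r + (m : Int)) hn (by omega) (by omega)
      have hm := ih r hr (by omega)
      omega
  have h := key (s - r).toNat r h1 (by omega)
  have hc : r + (((s - r).toNat : Nat) : Int) = s := by omega
  rw [hc] at h; exact h

-- (row, pos) ↦ rowPrefix row n + pos is injective on valid cells
theorem cell_inj (n r r' p p' : Int) (hn : 1 ≤ n)
    (hr : 1 ≤ r) (hr2 : r ≤ 2 * n) (hp : 1 ≤ p) (hp2 : p ≤ rowWidth r n)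
    (hr' : 1 ≤ r') (hr2' : r' ≤ 2 * n) (hp' : 1 ≤ p') (hp2' : p' ≤ rowWidth r' n)
    (heq : rowPrefix r n + p = rowPrefix r' n + p') : r = r' ∧ p = p' := by
  rcases lt_trichotomy r r' with h | h | h
  · exfalso
    have h1 : rowPrefix r n + p ≤ rowPrefix (r + 1) n := by
      have := rowPrefix_step n r hn hr hr2; omega
    have h2 : rowPrefix (r + 1) n ≤ rowPrefix r' n :=
      rowPrefix_mono n (r + 1) r' hn (by omega) (by omega) (by omega)
    omega
  · subst h; omega
  · exfalso
    have h1 : rowPrefix r' n + p' ≤ rowPrefix (r' + 1) n := by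
      have := rowPrefix_step n r' hn hr' hr2'; omega
    have h2 : rowPrefix (r' + 1) n ≤ rowPrefix r n :=
      rowPrefix_mono n (r' + 1) r hn (by omega) (by omega) (by omega)
    omega

-- the loop, from a consistent state, finds exactly the later valid cells (n ≥ 1)
theorem ibpLoop_eq (row position n : Int) (hn : 1 ≤ n) :
    ∀ (fuel : Nat) (idx pos crow cells : Int),
      (6 * n * n - idx).toNat = fuel →
      1 ≤ crow → crow ≤ 2 * n → 1 ≤ pos → pos ≤ cells → cells = rowWidth crow n →
      idx = rowPrefix crow n + pos →
      ibpLoop row position n idx pos crow cells =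
        if 1 ≤ row ∧ row ≤ 2 * n ∧ 1 ≤ position ∧ position ≤ rowWidth row n ∧
            idx < rowPrefix row n + position
        then some (rowPrefix row n + position) else none := by
  intro fuel
  induction fuel with
  | zero =>
    intro idx pos crow cells hfuel h1 h2 h3 h4 h5 h6
    have hidx : 6 * n * n ≤ idx := by omega
    rw [ibpLoop, dif_neg (by omega)]
    rw [if_neg]
    rintro ⟨a1, a2, a3, a4, a5⟩
    have hb : rowPrefix row n + position ≤ rowPrefix (row + 1) n := by
      have := rowPrefix_step n row hn a1 a2; omega
    have hc : rowPrefix (row + 1) n ≤ rowPrefix (2 * n + 1) n :=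
      rowPrefix_mono n (row + 1) (2 * n + 1) hn (by omega) (by omega) (by omega)
    have := rowPrefix_top n hn
    omega
  | succ m ih =>
    intro idx pos crow cells hfuel h1 h2 h3 h4 h5 h6
    have hidx : idx < 6 * n * n := by omega
    rw [ibpLoop, dif_pos hidx]
    by_cases hres : pos + 1 > cells
    · -- row change: pos = cells, move to row crow+1, pos 1
      have hpc : pos = cells := by omega
      have htop := rowPrefix_top n hn
      have hstep := rowPrefix_step n crow hn h1 h2
      have hidx' : idx + 1 = rowPrefix (crow + 1) n + 1 := by omega
      have hcrow' : crow + 1 ≤ 2 * n := by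
        by_contra hc
        have hc1 : crow + 1 = 2 * n + 1 := by omega
        rw [hc1] at hidx'; omega
      have hcells' :
          (if crow + 1 ≤ n then cells + 2
           else if crow + 1 ≠ n + 1 then cells - 2 else cells) = rowWidth (crow + 1) n := by
        subst h5; unfold rowWidth
        rcases lt_trichotomy (crow + 1) (n + 1) with h | h | h
        · rw [if_pos (by omega)]; omega
        · rw [if_neg (by omega), if_neg (by omega)]; omega
        · rw [if_neg (by omega), if_pos (by omega)]; omega
      have hw' : 1 ≤ rowWidth (crow + 1) n := rowWidth_pos n (crow + 1) hn (by omega) hcrow'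
      simp only [if_pos hres]
      by_cases hm : crow + 1 = row ∧ (1 : Int) = position
      · rw [if_pos hm]
        obtain ⟨hm1, hm2⟩ := hm
        subst hm1; subst hm2
        rw [if_pos ⟨by omega, hcrow', by omega, by omega, by omega⟩]
        exact congrArg some (by omega)
      · rw [if_neg hm]
        rw [ih (idx + 1) 1 (crow + 1)
            (if crow + 1 ≤ n then cells + 2 else if crow + 1 ≠ n + 1 then cells - 2 else cells)
            (by omega) (by omega) hcrow' (by omega) (by omega) hcells' (by omega)]
        by_cases hv : 1 ≤ row ∧ row ≤ 2 * n ∧ 1 ≤ position ∧ position ≤ rowWidth row n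
        · obtain ⟨a1, a2, a3, a4⟩ := hv
          have hne : rowPrefix row n + position ≠ idx + 1 := by
            intro hcontra
            have := cell_inj n row (crow + 1) position 1 hn a1 a2 a3 a4
              (by omega) hcrow' (by omega) (by omega) (by omega)
            exact hm ⟨(this.1).symm, (this.2).symm⟩
          by_cases hlt : idx < rowPrefix row n + position
          · rw [if_pos ⟨a1, a2, a3, a4, by omega⟩, if_pos ⟨a1, a2, a3, a4, by omega⟩]
          · rw [if_neg (by rintro ⟨_, _, _, _, h⟩; omega),
                if_neg (by rintro ⟨_, _, _, _, h⟩; omega)]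
        · rw [if_neg (by tauto), if_neg (by tauto)]
    · -- same row, pos + 1
      simp only [if_neg hres]
      by_cases hm : crow = row ∧ pos + 1 = position
      · rw [if_pos hm]
        obtain ⟨hm1, hm2⟩ := hm
        subst hm1; subst hm2
        rw [if_pos ⟨by omega, h2, by omega, by omega, by omega⟩]
        exact congrArg some (by omega)
      · rw [if_neg hm]
        rw [ih (idx + 1) (pos + 1) crow cells (by omega) h1 h2 (by omega) (by omega) h5
            (by omega)]
        by_cases hv : 1 ≤ row ∧ row ≤ 2 * n ∧ 1 ≤ position ∧ position ≤ rowWidth row n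
        · obtain ⟨a1, a2, a3, a4⟩ := hv
          have hne : rowPrefix row n + position ≠ idx + 1 := by
            intro hcontra
            have := cell_inj n row crow position (pos + 1) hn a1 a2 a3 a4
              h1 h2 (by omega) (by omega) (by omega)
            exact hm ⟨(this.1).symm, (this.2).symm⟩
          by_cases hlt : idx < rowPrefix row n + position
          · rw [if_pos ⟨a1, a2, a3, a4, by omega⟩, if_pos ⟨a1, a2, a3, a4, by omega⟩]
          · rw [if_neg (by rintro ⟨_, _, _, _, h⟩; omega),
                if_neg (by rintro ⟨_, _, _, _, h⟩; omega)]
        · rw [if_neg (by tauto), if_neg (by tauto)]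

-- degenerate grids: n ≤ 0, the loop resets pos every step and walks rows 1,2,3,…
theorem ibpLoop_deg (row position n : Int) (hn : n ≤ 0) :
    ∀ (fuel : Nat) (idx cells : Int),
      (6 * n * n - idx).toNat = fuel → cells ≤ 1 → 1 ≤ idx →
      ibpLoop row position n idx 1 idx cells =
        if position = 1 ∧ idx < row ∧ row ≤ 6 * n * n then some row else none := by
  intro fuel
  induction fuel with
  | zero =>
    intro idx cells hfuel hc hi
    rw [ibpLoop, dif_neg (by omega), if_neg (by omega)]
  | succ m ih =>
    intro idx cells hfuel hc hi
    have hidx : idx < 6 * n * n := by omega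
    rw [ibpLoop, dif_pos hidx]
    simp only [if_pos (show (1 : Int) + 1 > cells by omega)]
    by_cases hm : idx + 1 = row ∧ (1 : Int) = position
    · rw [if_pos hm, if_pos ⟨hm.2.symm, by omega, by omega⟩, hm.1]
    · rw [if_neg hm]
      rw [ih (idx + 1)
          (if idx + 1 ≤ n then cells + 2 else if idx + 1 ≠ n + 1 then cells - 2 else cells)
          (by omega) (by omega) (by omega)]
      by_cases hp : position = 1 ∧ row ≤ 6 * n * n
      · by_cases hlt : idx < row
        · have : row ≠ idx + 1 := fun h => hm ⟨h.symm, hp.1.symm⟩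
          rw [if_pos ⟨hp.1, by omega, hp.2⟩, if_pos ⟨hp.1, by omega, hp.2⟩]
        · rw [if_neg (by rintro ⟨_, h, _⟩; omega), if_neg (by rintro ⟨_, h, _⟩; omega)]
      · rw [if_neg (by tauto), if_neg (by tauto)]

-- closed form for A, all inputs
theorem index_by_position_eq (row position n : Int) :
    index_by_position row position n =
      if 1 ≤ n then
        (if 1 ≤ row ∧ row ≤ 2 * n ∧ 1 ≤ position ∧ position ≤ rowWidth row n
         then some (rowPrefix row n + position) else none)
      else
        (if position = 1 ∧ 1 ≤ row ∧ (row = 1 ∨ row ≤ 6 * n * n) then some row else none) := by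
  unfold index_by_position
  by_cases hn : 1 ≤ n
  · rw [if_pos hn]
    have hP1 := rowPrefix_one n hn
    have hW1 : rowWidth 1 n = n * 2 + 1 := by unfold rowWidth; omega
    have hloop := ibpLoop_eq row position n hn (6 * n * n - 1).toNat 1 1 1 (n * 2 + 1)
      rfl (by omega) (by omega) (by omega) (by omega) (hW1.symm) (by omega)
    by_cases hm : (1 : Int) = row ∧ (1 : Int) = position
    · obtain ⟨hm1, hm2⟩ := hm
      rw [if_pos ⟨hm1, hm2⟩]
      rw [← hm1, ← hm2]
      rw [if_pos ⟨by omega, by omega, by omega, by omega⟩]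
      exact congrArg some (by omega)
    · rw [if_neg hm, hloop]
      by_cases hv : 1 ≤ row ∧ row ≤ 2 * n ∧ 1 ≤ position ∧ position ≤ rowWidth row n
      · obtain ⟨a1, a2, a3, a4⟩ := hv
        have hne : rowPrefix row n + position ≠ 1 := by
          intro hcontra
          have := cell_inj n row 1 position 1 hn a1 a2 a3 a4 (by omega) (by omega) (by omega)
            (by omega) (by omega)
          exact hm ⟨(this.1).symm, (this.2).symm⟩
        have hge : 1 ≤ rowPrefix row n + position := by
          have := rowPrefix_mono n 1 row hn (by omega) a1 (by omega)
          omega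
        rw [if_pos ⟨a1, a2, a3, a4, by omega⟩, if_pos ⟨a1, a2, a3, a4⟩]
      · rw [if_neg (by tauto), if_neg (by tauto)]
  · rw [if_neg hn]
    have hloop := ibpLoop_deg row position n (by omega) (6 * n * n - 1).toNat 1 (n * 2 + 1)
      rfl (by omega) (by omega)
    by_cases hm : (1 : Int) = row ∧ (1 : Int) = position
    · rw [if_pos hm, if_pos ⟨hm.2.symm, by omega, Or.inl hm.1.symm⟩, hm.1]
    · rw [if_neg hm, hloop]
      by_cases hp : position = 1 ∧ 1 < row ∧ row ≤ 6 * n * n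
      · rw [if_pos ⟨hp.1, hp.2.1, hp.2.2⟩, if_pos ⟨hp.1, by omega, Or.inr hp.2.2⟩]
      · rw [if_neg (by tauto), if_neg]
        rintro ⟨b1, b2, b3⟩
        rcases b3 with b3 | b3
        · exact hm ⟨b3.symm, b1.symm⟩
        · by_cases hr1 : row = 1
          · exact hm ⟨hr1.symm, b1.symm⟩
          · exact hp ⟨b1, by omega, b3⟩

-- ===== VERDICT (by name: the statement is the Claim_ definition above) =====
theorem index_by_position_spec : Claim_unchanged_index_by_position := by
  intro row position n _ hnD
  rw [index_by_position_eq]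
  unfold index_by_position_alt
  by_cases hn : 1 ≤ n
  · rw [if_pos hn]
    by_cases hv : 1 ≤ row ∧ row ≤ 2 * n ∧ 1 ≤ position ∧ position ≤ rowWidth row n
    · rw [if_pos hv, if_neg (by omega), if_neg (by tauto)]
    · rw [if_neg hv]
      by_cases hr : 1 ≤ row ∧ row ≤ 2 * n
      · rw [if_neg (by omega), if_pos (by tauto)]
      · rw [if_pos (by omega)]
  · rw [if_neg hn, if_pos (Or.inl (by omega)), if_neg]
    rintro ⟨b1, b2, b3⟩
    exact hnD ⟨by omega, b1, b2, b3⟩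

theorem index_by_position_changed : Claim_changed_index_by_position := by
  unfold Claim_changed_index_by_position
  refine ⟨by decide, by decide, ?_, by decide, by decide⟩
  show index_by_position 2 1 (-1) = some 2
  rw [index_by_position_eq]; decide

theorem index_by_position_tight : Claim_exact_index_by_position := by
  intro row position n _ hD
  rw [index_by_position_eq]
  obtain ⟨d1, d2, d3, d4⟩ := hD
  rw [if_neg (by omega), if_pos ⟨d2, d3, d4⟩]
  unfold index_by_position_alt
  rw [if_pos (Or.inl d1)]
  simp
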